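-- pv_equiv track=rewrite | github.com/KyleLazera/10G_Ethernet_MAC-PCS | software/rx_sync_algo.py | rx_sync_algorithm
-- ===== SOURCE A (Python) =====
-- BLOCK_SIZE = 66
--
-- DATA_WIDTH = 32
--
-- MAX_NUM_BLOCKS = 500
--
-- def rx_sync_algorithm(num_junk_bits: int) -> int:
--     '''
--     This function contains the mathematical formula and implementation
--     used for the proof of concept of the rx block sync.
--
--     argument(s):
--     num_junk_bits - Used to specify how many bits precede the first actual
--                     synchronous header.
--
--     Return:
--     int - The nummber of cycles required to re-align the synchronous header
--     '''
--     expected_hdr_idx_list = []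
--     slip_cntr: int = 0
--
--     # Generate the positions of the headers
--     expected_hdr_idx_list = [num_junk_bits + BLOCK_SIZE * i for i in range(MAX_NUM_BLOCKS)]
--
--     for hdr_idx, hdr_value in enumerate(expected_hdr_idx_list):
--         # Increment slip counter on every odd cycle (simulate i_slip every 2nd cycle)
--         if hdr_idx % 2 == 1:
--             slip_cntr += 1
--
--         # Calculate adjusted header position after slips
--         adjusted_hdr_idx = hdr_value - (DATA_WIDTH) * slip_cntr
--
--         # Check parity-aware alignment
--         if (slip_cntr % 2 == 0 and adjusted_hdr_idx % BLOCK_SIZE in [0, 1]) or (slip_cntr % 2 == 1 and adjusted_hdr_idx % BLOCK_SIZE in [1, 2]):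
--             return slip_cntr
--
--     return -1
-- ===== SOURCE B (Python) =====
-- BLOCK_SIZE = 66
--
-- DATA_WIDTH = 32
--
-- MAX_NUM_BLOCKS = 500
--
-- def rx_sync_algorithm(num_junk_bits: int) -> int:
--     # The alignment test in the original only depends on the slip count s:
--     # the 66*hdr_idx term vanishes mod 66, so check each slip value directly.
--     for s in range(251):
--         residue = (num_junk_bits - DATA_WIDTH * s) % BLOCK_SIZE
--         if (s % 2 == 0 and residue in (0, 1)) or (s % 2 == 1 and residue in (1, 2)):
--             return s
--     return -1
-- ===== Notes on version B (the rewrite author's own statement) =====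
-- stated objective: simpler
-- what changed: B drops the 500-entry header-position list and the enumerate/slip-counter simulation: since the 66*hdr_idx term vanishes mod 66, the alignment test depends only on the slip count s, so B loops s over range(251) and tests the residue (num_junk_bits - 32*s) % 66 directly.
import Mathlib
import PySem

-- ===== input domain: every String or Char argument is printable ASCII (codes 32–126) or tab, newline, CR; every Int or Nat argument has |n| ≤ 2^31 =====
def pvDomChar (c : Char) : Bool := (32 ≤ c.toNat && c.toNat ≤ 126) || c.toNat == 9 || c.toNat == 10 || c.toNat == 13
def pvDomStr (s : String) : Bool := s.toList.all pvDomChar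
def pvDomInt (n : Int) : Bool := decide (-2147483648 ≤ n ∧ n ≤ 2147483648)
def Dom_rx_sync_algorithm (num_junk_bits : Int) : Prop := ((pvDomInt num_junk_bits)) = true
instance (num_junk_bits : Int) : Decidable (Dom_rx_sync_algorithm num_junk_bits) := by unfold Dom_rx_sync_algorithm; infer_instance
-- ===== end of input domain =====

-- B replaces A's 500-block header-position simulation by a direct loop over the 251
-- possible slip counts, testing the residue (num_junk_bits - 32*s) % 66 (objective: simpler).

-- ===== PORT A =====
-- the for-loop over enumerate(expected_hdr_idx_list) with early return and slip counter
def rxLoopA : List (Int × Int) → Int → Int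
  | [], _ => -1
  | (hdr_idx, hdr_value) :: rest, slip_cntr =>
    let slip_cntr := if PySem.Int.mod hdr_idx 2 = 1 then slip_cntr + 1 else slip_cntr
    let adjusted_hdr_idx := hdr_value - 32 * slip_cntr
    if (PySem.Int.mod slip_cntr 2 = 0 ∧
          (PySem.Int.mod adjusted_hdr_idx 66 = 0 ∨ PySem.Int.mod adjusted_hdr_idx 66 = 1)) ∨
       (PySem.Int.mod slip_cntr 2 = 1 ∧
          (PySem.Int.mod adjusted_hdr_idx 66 = 1 ∨ PySem.Int.mod adjusted_hdr_idx 66 = 2)) then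
      slip_cntr
    else rxLoopA rest slip_cntr

def rx_sync_algorithm (num_junk_bits : Int) : Int :=
  let expected_hdr_idx_list := (PySem.List.pyRange 0 500 1).map (fun i => num_junk_bits + 66 * i)
  rxLoopA (PySem.List.enumerate expected_hdr_idx_list) 0

-- ===== PORT B =====
-- the for-loop over range(251) with early return
def rxLoopB (num_junk_bits : Int) : List Int → Int
  | [] => -1
  | s :: rest =>
    let residue := PySem.Int.mod (num_junk_bits - 32 * s) 66
    if (PySem.Int.mod s 2 = 0 ∧ (residue = 0 ∨ residue = 1)) ∨
       (PySem.Int.mod s 2 = 1 ∧ (residue = 1 ∨ residue = 2)) then s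
    else rxLoopB num_junk_bits rest

def rx_sync_algorithm_alt (num_junk_bits : Int) : Int :=
  rxLoopB num_junk_bits (PySem.List.pyRange 0 251 1)

-- ===== PRECONDITION & SPEC =====
def Spec_rx_sync_algorithm (num_junk_bits : Int) (out : Int) : Prop := out = rx_sync_algorithm_alt num_junk_bits
instance (num_junk_bits : Int) (out : Int) : Decidable (Spec_rx_sync_algorithm num_junk_bits out) := by unfold Spec_rx_sync_algorithm; infer_instance

-- ===== CLAIM (what is proved, stated in full; the proofs are below) =====
def Claim_equal_rx_sync_algorithm : Prop := ∀ (num_junk_bits : Int), Dom_rx_sync_algorithm num_junk_bits → Spec_rx_sync_algorithm num_junk_bits (rx_sync_algorithm num_junk_bits)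

-- ===== LEMMAS AND PROOFS =====

theorem pymod66_add_mul (x d : Int) :
    PySem.Int.mod (x + 66 * d) 66 = PySem.Int.mod x 66 := by
  rw [PySem.Int.mod_eq_emod_of_pos (by norm_num), PySem.Int.mod_eq_emod_of_pos (by norm_num)]
  omega

-- shifting every header value by a multiple of 66 does not change A's loop result
theorem rxLoopA_shift (d : Int) :
    ∀ (l : List (Int × Int)) (s : Int),
      rxLoopA (l.map (fun p => (p.1, p.2 + 66 * d))) s = rxLoopA l s := by
  intro l
  induction l with
  | nil => intro s; rfl
  | cons p rest ih =>
    intro s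
    obtain ⟨i, hv⟩ := p
    simp only [List.map_cons, rxLoopA]
    have h : ∀ s' : Int,
        PySem.Int.mod (hv + 66 * d - 32 * s') 66 = PySem.Int.mod (hv - 32 * s') 66 := by
      intro s'
      have := pymod66_add_mul (hv - 32 * s') d
      rw [← this]; ring_nf
    rw [h, ih]

theorem enumerate_map_pysem {α β : Type} (g : α → β) :
    ∀ (xs : List α) (s : Int),
      PySem.List.enumerate (xs.map g) s
        = (PySem.List.enumerate xs s).map (fun p => (p.1, g p.2)) := by
  intro xs
  induction xs with
  | nil => intro s; rfl
  | cons x xs ih =>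
    intro s
    simp only [List.map_cons, PySem.List.enumerate_cons, ih]

theorem rxA_mod (n : Int) :
    rx_sync_algorithm n = rx_sync_algorithm (PySem.Int.mod n 66) := by
  have hn : n = (PySem.Int.mod n 66) + 66 * PySem.Int.floordiv n 66 := by
    have := PySem.Int.floordiv_mul_add_mod n 66
    omega
  unfold rx_sync_algorithm
  dsimp only
  rw [enumerate_map_pysem, enumerate_map_pysem]
  have hfun : (fun p : Int × Int => (p.1, n + 66 * p.2))
      = (fun p : Int × Int => (p.1, p.2 + 66 * PySem.Int.floordiv n 66))
          ∘ (fun p : Int × Int => (p.1, PySem.Int.mod n 66 + 66 * p.2)) := by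
    funext p; simp only [Function.comp, Prod.mk.injEq, true_and]; omega
  rw [hfun, ← List.map_map]
  exact rxLoopA_shift _ _ 0

theorem rxLoopB_congr (n m : Int)
    (h : ∀ s : Int, PySem.Int.mod (n - 32 * s) 66 = PySem.Int.mod (m - 32 * s) 66) :
    ∀ l : List Int, rxLoopB n l = rxLoopB m l := by
  intro l
  induction l with
  | nil => rfl
  | cons s rest ih =>
    simp only [rxLoopB, h, ih]

theorem rxB_mod (n : Int) :
    rx_sync_algorithm_alt n = rx_sync_algorithm_alt (PySem.Int.mod n 66) := by
  unfold rx_sync_algorithm_alt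
  refine rxLoopB_congr n (PySem.Int.mod n 66) ?_ _
  intro s
  have hn : n = (PySem.Int.mod n 66) + 66 * PySem.Int.floordiv n 66 := by
    have := PySem.Int.floordiv_mul_add_mod n 66
    omega
  calc PySem.Int.mod (n - 32 * s) 66
      = PySem.Int.mod ((PySem.Int.mod n 66 - 32 * s) + 66 * PySem.Int.floordiv n 66) 66 := by
        rw [show n - 32 * s = (PySem.Int.mod n 66 - 32 * s) + 66 * PySem.Int.floordiv n 66 from by omega]
    _ = PySem.Int.mod (PySem.Int.mod n 66 - 32 * s) 66 := pymod66_add_mul _ _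

-- the two programs agree on every residue mod 66
set_option maxRecDepth 4000 in
theorem agree_on_residues :
    ∀ r ∈ PySem.List.pyRange 0 66 1, rx_sync_algorithm r = rx_sync_algorithm_alt r := by
  decide

-- ===== VERDICT (by name: the statement is the Claim_ definition above) =====
theorem rx_sync_algorithm_spec : Claim_equal_rx_sync_algorithm := by
  intro n _
  unfold Spec_rx_sync_algorithm
  rw [rxA_mod, rxB_mod]
  refine agree_on_residues _ ?_
  rw [PySem.List.mem_pyRange_one]
  have h1 := PySem.Int.mod_nonneg n (b := 66) (by norm_num)
  have h2 := PySem.Int.mod_lt n (b := 66) (by norm_num)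
  omega
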